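-- pv_equiv track=rewrite | github.com/catx0rr/memory-purifier | scripts/assemble_artifacts.py | build_routes
-- ===== SOURCE A (Python) =====
-- def build_routes(claims: list) -> dict:
--     routes: dict = {
--         "LTMEMORY.md": [],
--         "PLAYBOOKS.md": [],
--         "EPISODES.md": [],
--         "HISTORY.md": [],
--         "WISHES.md": [],
--     }
--     inactive = {"superseded", "stale", "retire_candidate"}
--     for claim in claims:
--         home = claim.get("primaryHome")
--         if home in routes and claim.get("status") not in inactive:
--             routes[home].append(claim["id"])
--     for lst in routes.values():
--         lst.sort()
--     return routes
-- ===== SOURCE B (Python) =====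
-- def build_routes(claims: list) -> dict:
--     inactive = {"superseded", "stale", "retire_candidate"}
--     keys = ["LTMEMORY.md", "PLAYBOOKS.md", "EPISODES.md", "HISTORY.md", "WISHES.md"]
--     return {
--         k: sorted(c["id"] for c in claims
--                   if c.get("primaryHome") == k and c.get("status") not in inactive)
--         for k in keys
--     }
-- ===== Notes on version B (the rewrite author's own statement) =====
-- stated objective: idiomatic
-- what changed: A's single distributing pass into a mutable dict with per-bucket in-place sorts is replaced by a dict comprehension over the fixed route keys, each value built by one filtered scan of the claims and sorted on construction.
import Mathlib
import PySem

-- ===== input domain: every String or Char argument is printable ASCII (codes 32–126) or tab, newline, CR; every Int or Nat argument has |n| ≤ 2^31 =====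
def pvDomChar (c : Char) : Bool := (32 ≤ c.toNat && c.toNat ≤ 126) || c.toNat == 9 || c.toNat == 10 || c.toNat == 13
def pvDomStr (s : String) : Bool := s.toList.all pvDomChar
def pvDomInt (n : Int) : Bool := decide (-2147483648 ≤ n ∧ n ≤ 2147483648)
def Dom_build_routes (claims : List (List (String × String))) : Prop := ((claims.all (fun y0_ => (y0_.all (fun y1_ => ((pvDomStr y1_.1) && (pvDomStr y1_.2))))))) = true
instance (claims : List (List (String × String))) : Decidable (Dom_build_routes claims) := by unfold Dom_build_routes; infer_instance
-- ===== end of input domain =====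

-- B replaces A's single distributing pass into a mutable dict (with per-bucket in-place
-- sorts) by a dict comprehension over the fixed route keys: one filtered scan per key,
-- sorted on construction (objective: more idiomatic; same results, same ordering).


-- ===== PORT A =====
-- shared per-claim accessors (both Pythons compute claim.get(...) / the inactive set the same way)
def pvRouteKeys : List String :=
  ["LTMEMORY.md", "PLAYBOOKS.md", "EPISODES.md", "HISTORY.md", "WISHES.md"]

def pvInactive : PySem.Set String :=
  PySem.Set.ofList ["superseded", "stale", "retire_candidate"]

def pvHome (claim : List (String × String)) : Option String :=
  (PySem.Dict.mk claim).get? "primaryHome"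

-- claim.get("status") not in inactive  (None is never in the set)
def pvStatusInactive (claim : List (String × String)) : Bool :=
  match (PySem.Dict.mk claim).get? "status" with
  | some s => pvInactive.contains s
  | none => false

-- claim["id"]; total form — exact under Pre_build_routes (the KeyError inputs are excluded)
def pvId (claim : List (String × String)) : String :=
  (PySem.Dict.mk claim).getD "id" ""

-- the body of A's first for-loop
def pvStepA (r : PySem.Dict String (List String)) (claim : List (String × String)) :
    PySem.Dict String (List String) :=
  match pvHome claim with
  | some home =>
      if r.contains home && !(pvStatusInactive claim) then
        r.modify home [] (fun l => l ++ [pvId claim])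
      else r
  | none => r

def build_routes (claims : List (List (String × String))) : List (String × List String) :=
  let routes0 : PySem.Dict String (List String) :=
    PySem.Dict.ofList [("LTMEMORY.md", []), ("PLAYBOOKS.md", []),
                       ("EPISODES.md", []), ("HISTORY.md", []), ("WISHES.md", [])]
  let routes := claims.foldl pvStepA routes0
  routes.items.map (fun p => (p.1, PySem.List.sorted p.2 (fun x => x) false))

-- ===== PORT B =====
-- the comprehension's filtered generator for one route key k
def pvBucket (claims : List (List (String × String))) (k : String) : List String :=
  (claims.filter (fun c => pvHome c == some k && !(pvStatusInactive c))).map pvId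

def build_routes_alt (claims : List (List (String × String))) : List (String × List String) :=
  ["LTMEMORY.md", "PLAYBOOKS.md", "EPISODES.md", "HISTORY.md", "WISHES.md"].map
    (fun k => (k, PySem.List.sorted (pvBucket claims k) (fun x => x) false))

-- ===== PRECONDITION & SPEC =====
-- Pre_ excludes exactly the claims on which Python raises KeyError at claim["id"]:
-- a claim routed to one of the five keys, not inactive, but carrying no "id" key.
def Pre_build_routes (claims : List (List (String × String))) : Prop :=
  ∀ c ∈ claims,
    (∃ h, pvHome c = some h ∧ h ∈ pvRouteKeys) → pvStatusInactive c = false →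
      ((PySem.Dict.mk c).get? "id").isSome
instance (claims : List (List (String × String))) : Decidable (Pre_build_routes claims) := by
  unfold Pre_build_routes; infer_instance

def pvWitness_build_routes : (List (List (String × String))) :=
  [[("primaryHome", "EPISODES.md"), ("status", "active"), ("id", "c-1")],
   [("primaryHome", "EPISODES.md"), ("id", "a-2")],
   [("primaryHome", "elsewhere")]]

def Spec_build_routes (claims : List (List (String × String))) (out : List (String × List String)) : Prop := out = build_routes_alt claims
instance (claims : List (List (String × String))) (out : List (String × List String)) : Decidable (Spec_build_routes claims out) := by unfold Spec_build_routes; infer_instance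

-- ===== CLAIM (what is proved, stated in full; the proofs are below) =====
def Claim_equal_build_routes : Prop := ∀ (claims : List (List (String × String))), Dom_build_routes claims → Pre_build_routes claims → Spec_build_routes claims (build_routes claims)

-- ===== LEMMAS AND PROOFS =====

-- one step of A's loop on a bucket list: how pvBucket unfolds on a cons
theorem pvBucket_cons (c : List (String × String)) (claims : List (List (String × String))) (k : String) :
    pvBucket (c :: claims) k =
      (if pvHome c == some k && !(pvStatusInactive c) then [pvId c] else []) ++ pvBucket claims k := by
  simp only [pvBucket, List.filter_cons]
  split <;> simp

-- A's loop invariant: folding pvStepA appends, entrywise, exactly the per-key bucket.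
theorem foldA_items (claims : List (List (String × String)))
    (r : PySem.Dict String (List String)) (hnd : r.keys.Nodup) :
    (claims.foldl pvStepA r).items =
      r.items.map (fun p => (p.1, p.2 ++ pvBucket claims p.1)) := by
  induction claims generalizing r with
  | nil => simp [pvBucket]
  | cons c rest ih =>
    simp only [List.foldl_cons]
    rcases hh : pvHome c with _ | h
    · -- home is None: step skips, no bucket gets c
      have hstep : pvStepA r c = r := by simp [pvStepA, hh]
      rw [hstep, ih r hnd]
      apply List.map_congr_left
      intro p _
      rw [pvBucket_cons]
      simp [hh]
    · by_cases hcond : (r.contains h && !(pvStatusInactive c)) = true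
      · -- claim is routed: modify appends pvId c to bucket h
        have hcont : r.contains h = true := by
          simp only [Bool.and_eq_true] at hcond; exact hcond.1
        have hst : pvStatusInactive c = false := by
          simp only [Bool.and_eq_true, Bool.not_eq_true'] at hcond; exact hcond.2
        have hstep : pvStepA r c = r.insert h ((r.getD h []) ++ [pvId c]) := by
          simp [pvStepA, hh, hcond, PySem.Dict.modify]
        have hitems := PySem.Dict.items_insert_of_contains r ((r.getD h []) ++ [pvId c]) hcont
        have hkeys : (r.insert h ((r.getD h []) ++ [pvId c])).keys = r.keys := by
          simp only [PySem.Dict.keys, hitems, List.map_map]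
          apply List.map_congr_left
          intro p _
          by_cases hpk : p.1 = h <;> simp [hpk]
        rw [hstep, ih _ (by rw [hkeys]; exact hnd), hitems, List.map_map]
        apply List.map_congr_left
        intro p hp
        have hval : r.getD p.1 [] = p.2 :=
          PySem.Dict.getD_of_mem_items r hp hnd []
        by_cases hpk : p.1 = h
        · subst hpk
          rw [pvBucket_cons]
          simp [hval, hst, hh, Function.comp]
        · rw [pvBucket_cons]
          have : (pvHome c == some p.1) = false := by
            simp [hh]; exact fun e => hpk e.symm
          simp [Function.comp, hpk, this]
      · -- routed nowhere (home not a key) or inactive: step skips, buckets of the keys unchanged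
        have hstep : pvStepA r c = r := by simp [pvStepA, hh, hcond]
        rw [hstep, ih r hnd]
        apply List.map_congr_left
        intro p hp
        rw [pvBucket_cons]
        rcases Bool.and_eq_false_iff.mp (Bool.eq_false_iff.mpr hcond) with hc | hs
        · have hpk : p.1 ≠ h := by
            intro e
            exact (Bool.eq_false_iff.mp hc)
              ((PySem.Dict.contains_iff_mem_keys r h).mpr
                (e ▸ PySem.Dict.mem_keys_of_mem_items r hp))
          have : (pvHome c == some p.1) = false := by
            simp [hh]; exact fun e => hpk e.symm
          simp [this]
        · have : pvStatusInactive c = true := by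
            cases hb : pvStatusInactive c
            · rw [hb] at hs; simp at hs
            · rfl
          simp [this]

-- ===== VERDICT (by name: the statement is the Claim_ definition above) =====
theorem build_routes_spec : Claim_equal_build_routes := by
  intro claims _ _
  show build_routes claims = build_routes_alt claims
  show (List.foldl pvStepA (PySem.Dict.ofList
        [("LTMEMORY.md", []), ("PLAYBOOKS.md", []), ("EPISODES.md", []),
         ("HISTORY.md", []), ("WISHES.md", [])]) claims).items.map
        (fun p => (p.1, PySem.List.sorted p.2 (fun x => x) false)) = _
  rw [foldA_items claims _ (by decide)]
  simp [PySem.Dict.ofList, PySem.Dict.empty]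
  rfl
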